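-- pv_equiv track=rewrite | github.com/Juunsik/Algorithm_Kata | Lv8/208.py | solution
-- ===== SOURCE A (Python) =====
-- def solution(my_string):
--     string_list = my_string.split()
--     answer = int(string_list[0])
--     for i in range(1, len(string_list)):
--         if string_list[i] == "+":
--             answer += int(string_list[i + 1])
--         if string_list[i] == "-":
--             answer -= int(string_list[i + 1])
--     return answer
-- ===== SOURCE B (Python) =====
-- def solution(my_string):
--     tokens = my_string.split()
--     nums = [int(t) for t in tokens[0::2]]
--     signs = [{"+": 1, "-": -1}[op] for op in tokens[1::2]]
--     return nums[0] + sum(s * n for s, n in zip(signs, nums[1:]))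
-- ===== Notes on version B (the rewrite author's own statement) =====
-- stated objective: simpler
-- what changed: B splits the token list by position parity into operand and operator slices (tokens[0::2]/tokens[1::2]), maps operators to +1/-1 through a sign table, and returns nums[0] plus a zipped signed sum, instead of A's index loop that inspects every token and mutates an accumulator.
-- outside the precondition, e.g. on solution('1 2'): A returns 1, B raises KeyError; on solution('1 + 2 3'): A returns 3, B raises KeyError; on solution('+'): A raises ValueError, B raises ValueError
import Mathlib
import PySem

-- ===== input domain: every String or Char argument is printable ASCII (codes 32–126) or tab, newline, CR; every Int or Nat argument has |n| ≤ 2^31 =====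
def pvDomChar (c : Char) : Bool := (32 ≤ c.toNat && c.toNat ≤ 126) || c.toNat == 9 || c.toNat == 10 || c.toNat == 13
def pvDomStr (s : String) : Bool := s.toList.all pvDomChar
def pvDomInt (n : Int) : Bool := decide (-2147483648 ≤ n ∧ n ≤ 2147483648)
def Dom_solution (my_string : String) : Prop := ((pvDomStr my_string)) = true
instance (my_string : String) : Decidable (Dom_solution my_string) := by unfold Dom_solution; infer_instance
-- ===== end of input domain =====

-- B decomposes the tokens by position parity into operand/operator slices and returns a zipped
-- signed sum, instead of A's index loop inspecting every token; same value on Pre_ (well-formed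
-- expressions).

-- ===== PORT A =====
-- for i in range(1, len(string_list)): two independent ifs updating answer
def solutionLoop (tokens : List String) (i : Nat) (answer : Int) : Int :=
  if i < tokens.length then
    -- the two sequential 'if' updates of answer, the first inlined into the second
    solutionLoop tokens (i + 1)
      (if tokens.getD i "" = "-" then
        (if tokens.getD i "" = "+" then answer + (PySem.Int.ofStr? (tokens.getD (i + 1) "")).getD 0 else answer)
          - (PySem.Int.ofStr? (tokens.getD (i + 1) "")).getD 0
       else
        (if tokens.getD i "" = "+" then answer + (PySem.Int.ofStr? (tokens.getD (i + 1) "")).getD 0 else answer))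
  else answer
termination_by tokens.length - i

def solution (my_string : String) : Int :=
  let string_list := PySem.Str.split₀ my_string
  let answer := (PySem.Int.ofStr? (string_list.getD 0 "")).getD 0   -- int(string_list[0]); Pre_ excludes IndexError/ValueError
  solutionLoop string_list 1 answer

-- ===== PORT B =====
-- tokens[0::2] / tokens[1::2]: stride-2 slice, ported by hand (exact for step 2 from the front)
def strideTwo : List String → List String
  | [] => []
  | [x] => [x]
  | x :: _ :: rest => x :: strideTwo rest

def solution_alt (my_string : String) : Int :=
  let tokens := PySem.Str.split₀ my_string
  -- [int(t) for t in tokens[0::2]]; int() ValueError excluded by Pre_, so getD 0 is never reached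
  let nums := (strideTwo tokens).map (fun t => (PySem.Int.ofStr? t).getD 0)
  -- [{"+": 1, "-": -1}[op] for op in tokens[1::2]]; KeyError excluded by Pre_, default never reached
  let signs := (strideTwo (tokens.drop 1)).map (fun op => if op = "+" then (1 : Int) else if op = "-" then -1 else 0)
  -- nums[0] + sum(s * n for s, n in zip(signs, nums[1:])); IndexError on [] excluded by Pre_
  nums.getD 0 0 + ((signs.zip (nums.drop 1)).foldl (fun a p => a + p.1 * p.2) 0)

-- ===== PRECONDITION & SPEC =====
-- Pre_ = well-formed expressions: odd token count, even positions parse as ints, odd positions are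
-- "+"/"-". A raises outside this on operators with a missing/unparseable operand and on a bad first
-- token; it also RETURNS on token lists with stray non-operator junk (silently skipped) — excluded
-- because B's sign-table lookup raises KeyError there (see cites).
def Pre_solution (my_string : String) : Prop :=
  let tokens := PySem.Str.split₀ my_string
  tokens.length % 2 = 1 ∧
  ∀ i : Nat, i < tokens.length →
    (i % 2 = 0 → (PySem.Int.ofStr? (tokens.getD i "")).isSome = true) ∧
    (i % 2 = 1 → tokens.getD i "" = "+" ∨ tokens.getD i "" = "-")
instance (my_string : String) : Decidable (Pre_solution my_string) := by
  unfold Pre_solution; infer_instance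

def pvWitness_solution : String := "3 + 4 - 2"

def Spec_solution (my_string : String) (out : Int) : Prop := out = solution_alt my_string
instance (my_string : String) (out : Int) : Decidable (Spec_solution my_string out) := by
  unfold Spec_solution; infer_instance

-- ===== CLAIM =====
def Claim_equal_solution : Prop := ∀ (my_string : String), Dom_solution my_string → Pre_solution my_string → Spec_solution my_string (solution my_string)

-- ===== LEMMAS AND PROOFS =====

theorem ofStr?_ne_op {s : String} (h : (PySem.Int.ofStr? s).isSome = true) :
    s ≠ "+" ∧ s ≠ "-" := by
  constructor
  · rintro rfl; rw [show PySem.Int.ofStr? "+" = none from by decide] at h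
    exact absurd h (by decide)
  · rintro rfl; rw [show PySem.Int.ofStr? "-" = none from by decide] at h
    exact absurd h (by decide)

-- A's index loop viewed on the suffix of the token list
def listLoop : List String → Int → Int
  | [], acc => acc
  | t :: rest, acc =>
    listLoop rest
      (if t = "-" then
        (if t = "+" then acc + (PySem.Int.ofStr? (rest.getD 0 "")).getD 0 else acc)
          - (PySem.Int.ofStr? (rest.getD 0 "")).getD 0
       else (if t = "+" then acc + (PySem.Int.ofStr? (rest.getD 0 "")).getD 0 else acc))

theorem listLoop_cons (t : String) (rest : List String) (acc : Int) :
    listLoop (t :: rest) acc = listLoop rest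
      (if t = "-" then
        (if t = "+" then acc + (PySem.Int.ofStr? (rest.getD 0 "")).getD 0 else acc)
          - (PySem.Int.ofStr? (rest.getD 0 "")).getD 0
       else (if t = "+" then acc + (PySem.Int.ofStr? (rest.getD 0 "")).getD 0 else acc)) := rfl

theorem solutionLoop_eq_listLoop (tokens : List String) (i : Nat) (acc : Int) :
    solutionLoop tokens i acc = listLoop (tokens.drop i) acc := by
  by_cases h : i < tokens.length
  · have hd : tokens.drop i = tokens.getD i "" :: tokens.drop (i + 1) := by
      rw [List.drop_eq_getElem_cons h, List.getD_eq_getElem _ _ h]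
    have h1 : (tokens.drop (i + 1)).getD 0 "" = tokens.getD (i + 1) "" := by
      simp only [List.getD_eq_getElem?_getD, List.getElem?_drop, Nat.add_zero]
    rw [solutionLoop, if_pos h, solutionLoop_eq_listLoop tokens (i + 1), hd, listLoop, h1]
  · rw [solutionLoop, if_neg h, List.drop_eq_nil_of_le (by omega), listLoop]
termination_by tokens.length - i
decreasing_by omega

def signOf (op : String) : Int := if op = "+" then 1 else if op = "-" then -1 else 0
def intD (t : String) : Int := (PySem.Int.ofStr? t).getD 0

theorem foldl_mul_add (l : List (Int × Int)) (a : Int) :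
    l.foldl (fun a p => a + p.1 * p.2) a = a + l.foldl (fun a p => a + p.1 * p.2) 0 := by
  induction l generalizing a with
  | nil => simp
  | cons x xs ih => simp only [List.foldl_cons]; rw [ih (a + x.1 * x.2), ih (0 + x.1 * x.2)]; ring

theorem listLoop_eq_sum (rest : List String)
    (hlen : rest.length % 2 = 0)
    (hwf : ∀ j : Nat, j < rest.length →
      (j % 2 = 0 → rest.getD j "" = "+" ∨ rest.getD j "" = "-") ∧
      (j % 2 = 1 → (PySem.Int.ofStr? (rest.getD j "")).isSome = true)) :
    ∀ acc : Int, listLoop rest acc =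
      acc + (((strideTwo rest).map signOf).zip ((strideTwo (rest.drop 1)).map intD)).foldl
        (fun a p => a + p.1 * p.2) 0 := by
  match rest with
  | [] => intro acc; simp [listLoop, strideTwo]
  | [op] => simp at hlen
  | op :: num :: rest' =>
    intro acc
    have hop : op = "+" ∨ op = "-" := by
      have := (hwf 0 (by simp) ).1 (by decide); simpa using this
    have hnum : (PySem.Int.ofStr? num).isSome = true := by
      have := (hwf 1 (by simp)).2 (by decide); simpa using this
    obtain ⟨hn1, hn2⟩ := ofStr?_ne_op hnum
    have hlen' : rest'.length % 2 = 0 := by simp at hlen; omega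
    have hwf' : ∀ j : Nat, j < rest'.length →
        (j % 2 = 0 → rest'.getD j "" = "+" ∨ rest'.getD j "" = "-") ∧
        (j % 2 = 1 → (PySem.Int.ofStr? (rest'.getD j "")).isSome = true) := by
      intro j hj
      have := hwf (j + 2) (by simp; omega)
      constructor
      · intro hp; exact (by simpa using this.1 (by omega))
      · intro hp; exact (by simpa using this.2 (by omega))
    have ih := listLoop_eq_sum rest' hlen' hwf'
    -- two steps of the loop: the operator step, then the no-op number step
    have step : listLoop (op :: num :: rest') acc =
        listLoop rest' (acc + signOf op * intD num) := by
      rcases hop with rfl | rfl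
      · rw [listLoop_cons, List.getD_cons_zero,
          if_neg (show ¬("+" : String) = "-" by decide), if_pos (show ("+" : String) = "+" from rfl),
          listLoop_cons, if_neg hn2, if_neg hn1,
          show signOf "+" = 1 from by decide]
        congr 1; unfold intD; ring
      · rw [listLoop_cons, List.getD_cons_zero,
          if_pos (show ("-" : String) = "-" from rfl), if_neg (show ¬("-" : String) = "+" by decide),
          listLoop_cons, if_neg hn2, if_neg hn1,
          show signOf "-" = -1 from by decide]
        congr 1; unfold intD; ring
    rw [step, ih]
    have hs1 : strideTwo (op :: num :: rest') = op :: strideTwo rest' := rfl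
    have hs2 : (op :: num :: rest').drop 1 = num :: rest' := rfl
    have hs3 : strideTwo (num :: rest') = num :: strideTwo (rest'.drop 1) := by
      match rest' with
      | [] => rfl
      | y :: r => rfl
    rw [hs1, hs2, hs3]
    simp only [List.map_cons, List.zip_cons_cons, List.foldl_cons]
    rw [show ((0 : Int) + signOf op * intD num) = signOf op * intD num from by ring,
      foldl_mul_add _ (signOf op * intD num)]
    ring

-- ===== VERDICT =====
theorem solution_spec : Claim_equal_solution := by
  intro my_string _ hPre
  obtain ⟨hlen, hwf⟩ := hPre
  unfold Spec_solution solution solution_alt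
  generalize PySem.Str.split₀ my_string = tokens at hlen hwf ⊢
  cases tokens with
  | nil => simp at hlen
  | cons t0 rest =>
    have hlen' : rest.length % 2 = 0 := by simp [List.length_cons] at hlen; omega
    have hwf' : ∀ j : Nat, j < rest.length →
        (j % 2 = 0 → rest.getD j "" = "+" ∨ rest.getD j "" = "-") ∧
        (j % 2 = 1 → (PySem.Int.ofStr? (rest.getD j "")).isSome = true) := by
      intro j hj
      have := hwf (j + 1) (by simp; omega)
      constructor
      · intro hp; exact (by simpa using this.2 (by omega))
      · intro hp; exact (by simpa using this.1 (by omega))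
    have hs3 : strideTwo (t0 :: rest) = t0 :: strideTwo (rest.drop 1) := by
      match rest with
      | [] => rfl
      | y :: r => rfl
    simp only [List.getD_cons_zero, hs3, List.map_cons, List.drop_succ_cons, List.drop_zero]
    rw [solutionLoop_eq_listLoop]
    simp only [List.drop_succ_cons, List.drop_zero]
    rw [listLoop_eq_sum rest hlen' hwf']
    rfl
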